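-- pv_equiv track=rewrite | github.com/drewblasius/lfsr | Finished/Chaotic_Register_v3.py | arnoldcat
-- ===== SOURCE A (Python) =====
-- def arnoldcat(xy):
--     for i in range(7):
--         xy2 = []
--         x = xy[0]
--         y = xy[1]
--         xy2.append((x + y) % 512)
--         xy2.append((x+2*y) % 512)
--         xy = xy2
--     return xy
-- ===== SOURCE B (Python) =====
-- def arnoldcat(xy):
--     # binary exponentiation of the step matrix [[1,1],[1,2]] mod 512, applied once
--     def mul(a, b):
--         return (
--             (a[0] * b[0] + a[1] * b[2]) % 512,
--             (a[0] * b[1] + a[1] * b[3]) % 512,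
--             (a[2] * b[0] + a[3] * b[2]) % 512,
--             (a[2] * b[1] + a[3] * b[3]) % 512,
--         )
--     m = (1, 1, 1, 2)
--     r = (1, 0, 0, 1)
--     n = 7
--     while n:
--         if n & 1:
--             r = mul(r, m)
--         m = mul(m, m)
--         n >>= 1
--     x, y = xy[0], xy[1]
--     return [(r[0] * x + r[1] * y) % 512, (r[2] * x + r[3] * y) % 512]
-- ===== Notes on version B (the rewrite author's own statement) =====
-- stated objective: alternative
-- what changed: Replaces A's 7 explicit list-rebuilding iterations of the cat map with binary exponentiation of the 2x2 step matrix mod 512, applying the resulting matrix to the input once.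
import Mathlib
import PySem

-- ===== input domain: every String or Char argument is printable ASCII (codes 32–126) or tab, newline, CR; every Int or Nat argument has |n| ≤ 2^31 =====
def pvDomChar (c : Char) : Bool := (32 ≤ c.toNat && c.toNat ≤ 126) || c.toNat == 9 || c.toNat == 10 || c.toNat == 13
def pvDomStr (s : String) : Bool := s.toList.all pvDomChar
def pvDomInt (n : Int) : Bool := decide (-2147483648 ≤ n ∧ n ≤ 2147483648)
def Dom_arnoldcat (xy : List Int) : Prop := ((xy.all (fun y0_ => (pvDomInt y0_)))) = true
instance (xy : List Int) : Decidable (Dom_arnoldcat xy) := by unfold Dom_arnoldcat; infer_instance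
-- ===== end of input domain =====

-- B replaces A's 7 list-rebuilding iterations of the cat map by binary exponentiation
-- of the 2x2 step matrix mod 512, applied once; objective: alternative.

-- ===== PORT A =====
-- loop body: x = xy[0]; y = xy[1]; xy2 = [(x+y) % 512, (x+2*y) % 512]
-- ([] stands for the IndexError arm, excluded by Pre_)
def arnoldcatStep (xy : List Int) : List Int :=
  match PySem.List.pyGet? xy 0, PySem.List.pyGet? xy 1 with
  | some x, some y => [PySem.Int.mod (x + y) 512, PySem.Int.mod (x + 2 * y) 512]
  | _, _ => []

def arnoldcat (xy : List Int) : List Int :=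
  (PySem.List.pyRange 0 7 1).foldl (fun s _ => arnoldcatStep s) xy

-- ===== PORT B =====
-- mul: 2x2 matrix product mod 512, matrices stored row-major as 4-tuples
def acMul (a b : Int × Int × Int × Int) : Int × Int × Int × Int :=
  (PySem.Int.mod (a.1 * b.1 + a.2.1 * b.2.2.1) 512,
   PySem.Int.mod (a.1 * b.2.1 + a.2.1 * b.2.2.2) 512,
   PySem.Int.mod (a.2.2.1 * b.1 + a.2.2.2 * b.2.2.1) 512,
   PySem.Int.mod (a.2.2.1 * b.2.1 + a.2.2.2 * b.2.2.2) 512)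

-- the while-loop of Source B: n >>= 1 each round, square m, multiply r in when n is odd
-- (fuel only makes the recursion structural; fuel = n bounds the halvings, so the
--  fuel-0 arm is never reached and the loop runs exactly as in Source B)
def acPow (fuel : Nat) (n : Nat) (m r : Int × Int × Int × Int) : Int × Int × Int × Int :=
  match fuel with
  | 0 => r
  | fuel + 1 =>
    if n = 0 then r
    else acPow fuel (n / 2) (acMul m m) (if n % 2 = 1 then acMul r m else r)

def arnoldcat_alt (xy : List Int) : List Int :=
  let p := acPow 7 7 (1, 1, 1, 2) (1, 0, 0, 1)
  match PySem.List.pyGet? xy 0, PySem.List.pyGet? xy 1 with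
  | some x, some y =>
      [PySem.Int.mod (p.1 * x + p.2.1 * y) 512,
       PySem.Int.mod (p.2.2.1 * x + p.2.2.2 * y) 512]
  | _, _ => []

-- ===== PRECONDITION & SPEC =====
-- A raises IndexError (xy[0] or xy[1]) when the list has fewer than two elements
def Pre_arnoldcat (xy : List Int) : Prop := 2 ≤ xy.length
instance (xy : List Int) : Decidable (Pre_arnoldcat xy) := by unfold Pre_arnoldcat; infer_instance
def pvWitness_arnoldcat : List Int := [3, 5]

def Spec_arnoldcat (xy : List Int) (out : List Int) : Prop := out = arnoldcat_alt xy
instance (xy : List Int) (out : List Int) : Decidable (Spec_arnoldcat xy out) := by unfold Spec_arnoldcat; infer_instance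

-- ===== CLAIM (what is proved, stated in full; the proofs are below) =====
def Claim_equal_arnoldcat : Prop := ∀ (xy : List Int), Dom_arnoldcat xy → Pre_arnoldcat xy → Spec_arnoldcat xy (arnoldcat xy)

-- ===== LEMMAS AND PROOFS =====
theorem L1 (u v : Int) : ((u % 512) + (v % 512)) % 512 = (u + v) % 512 := by omega
theorem L2 (u v : Int) : ((u % 512) + 2 * (v % 512)) % 512 = (u + 2 * v) % 512 := by omega

theorem step_cons (a b : Int) (r : List Int) :
    arnoldcatStep (a :: b :: r) = [(a + b) % 512, (a + 2 * b) % 512] := by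
  have h : (0:Int) ≤ (r.length:Int) + 1 := by positivity
  simp [arnoldcatStep, PySem.List.pyGet?, PySem.List.pyIdx?, h]

theorem arnoldcat_cons (x y : Int) (r : List Int) :
    arnoldcat (x :: y :: r) = [(233 * x + 377 * y) % 512, (377 * x + 610 * y) % 512] := by
  have hr : PySem.List.pyRange 0 7 1 = [0, 1, 2, 3, 4, 5, 6] := by decide
  simp only [arnoldcat, hr, List.foldl, step_cons, L1, L2, List.cons.injEq, and_true]
  constructor <;> (congr 1; ring)

theorem acPow_seven : acPow 7 7 (1, 1, 1, 2) (1, 0, 0, 1) = (233, 377, 377, 98) := by decide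

theorem alt_cons (x y : Int) (r : List Int) :
    arnoldcat_alt (x :: y :: r) = [(233 * x + 377 * y) % 512, (377 * x + 610 * y) % 512] := by
  have h : (0:Int) ≤ (r.length:Int) + 1 := by positivity
  simp [arnoldcat_alt, acPow_seven, PySem.List.pyGet?, PySem.List.pyIdx?, h]
  omega

-- ===== VERDICT (by name: the statement is the Claim_ definition above) =====
theorem arnoldcat_spec : Claim_equal_arnoldcat := by
  intro xy _ hpre
  match xy, hpre with
  | x :: y :: r, _ =>
    show arnoldcat (x :: y :: r) = arnoldcat_alt (x :: y :: r)
    rw [arnoldcat_cons, alt_cons]
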